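-- pv_equiv track=rewrite | github.com/amitprp/Serper-Assignment | tests/load_test.py | generate_queries
-- ===== SOURCE A (Python) =====
-- SAMPLE_QUERIES = [
--     "python web scraping",
--     "machine learning tutorial",
--     "best programming languages 2024",
--     "how to learn coding",
--     "javascript frameworks",
--     "data science projects",
--     "cloud computing basics",
--     "cybersecurity tips",
--     "artificial intelligence news",
--     "software engineering jobs",
--     "react vs vue",
--     "docker tutorial",
--     "kubernetes basics",
--     "git commands",
--     "linux terminal commands",
--     "sql database design",
--     "mongodb tutorial",
--     "api design best practices",
--     "microservices architecture",
--     "devops tools",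
--     "python fastapi",
--     "web development trends",
--     "mobile app development",
--     "blockchain explained",
--     "quantum computing basics",
--     "rust programming language",
--     "golang tutorial",
--     "typescript vs javascript",
--     "css flexbox guide",
--     "html5 features",
--     "node.js best practices",
--     "django vs flask",
--     "aws services overview",
--     "azure cloud platform",
--     "google cloud tutorial",
--     "redis caching",
--     "elasticsearch basics",
--     "graphql vs rest",
--     "websocket tutorial",
--     "oauth2 explained",
--     "jwt authentication",
--     "unit testing python",
--     "integration testing",
--     "ci cd pipeline",
--     "agile methodology",
--     "scrum framework",
--     "product management",
--     "ux design principles",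
--     "figma tutorial",
--     "tech startup ideas",
-- ]
--
-- def generate_queries(n: int) -> list[str]:
--     """Generate n queries by cycling through sample queries with variations."""
--     queries = []
--     for i in range(n):
--         base_query = SAMPLE_QUERIES[i % len(SAMPLE_QUERIES)]
--         # Add some variation to avoid caching
--         if i >= len(SAMPLE_QUERIES):
--             variation = i // len(SAMPLE_QUERIES)
--             base_query = f"{base_query} {variation}"
--         queries.append(base_query)
--     return queries
-- ===== SOURCE B (Python) =====
-- def _cycled_queries(n):
--     """Yield the first n queries: cycle c over SAMPLE_QUERIES, suffixing the cycle number."""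
--     produced = 0
--     c = 0
--     while produced < n:
--         for q in SAMPLE_QUERIES:
--             if produced >= n:
--                 break
--             yield q if c == 0 else f"{q} {c}"
--             produced += 1
--         c += 1
--
--
-- def generate_queries(n: int) -> list[str]:
--     """Generate n queries by cycling through sample queries with variations."""
--     return list(_cycled_queries(n))
--
-- SAMPLE_QUERIES = [
--     "python web scraping",
--     "machine learning tutorial",
--     "best programming languages 2024",
--     "how to learn coding",
--     "javascript frameworks",
--     "data science projects",
--     "cloud computing basics",
--     "cybersecurity tips",
--     "artificial intelligence news",
--     "software engineering jobs",
--     "react vs vue",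
--     "docker tutorial",
--     "kubernetes basics",
--     "git commands",
--     "linux terminal commands",
--     "sql database design",
--     "mongodb tutorial",
--     "api design best practices",
--     "microservices architecture",
--     "devops tools",
--     "python fastapi",
--     "web development trends",
--     "mobile app development",
--     "blockchain explained",
--     "quantum computing basics",
--     "rust programming language",
--     "golang tutorial",
--     "typescript vs javascript",
--     "css flexbox guide",
--     "html5 features",
--     "node.js best practices",
--     "django vs flask",
--     "aws services overview",
--     "azure cloud platform",
--     "google cloud tutorial",
--     "redis caching",
--     "elasticsearch basics",
--     "graphql vs rest",
--     "websocket tutorial",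
--     "oauth2 explained",
--     "jwt authentication",
--     "unit testing python",
--     "integration testing",
--     "ci cd pipeline",
--     "agile methodology",
--     "scrum framework",
--     "product management",
--     "ux design principles",
--     "figma tutorial",
--     "tech startup ideas",
-- ]
-- ===== Notes on version B (the rewrite author's own statement) =====
-- stated objective: alternative
-- what changed: Replaces the flat index loop with i % L / i // L arithmetic by a two-level traversal: an outer cycle counter and an inner loop over SAMPLE_QUERIES itself, breaking when n queries are built, so no modulo or division is used.
import Mathlib
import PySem

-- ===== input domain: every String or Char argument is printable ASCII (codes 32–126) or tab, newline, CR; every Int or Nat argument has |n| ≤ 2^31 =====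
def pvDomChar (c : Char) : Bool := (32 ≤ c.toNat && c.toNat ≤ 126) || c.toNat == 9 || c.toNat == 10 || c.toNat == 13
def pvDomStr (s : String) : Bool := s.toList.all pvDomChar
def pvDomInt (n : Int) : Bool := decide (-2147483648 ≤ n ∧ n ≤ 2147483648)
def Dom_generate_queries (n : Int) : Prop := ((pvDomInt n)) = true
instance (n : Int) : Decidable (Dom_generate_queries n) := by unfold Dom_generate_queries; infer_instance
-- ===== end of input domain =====

-- B restructures A's flat index loop (i % L, i // L) into an outer cycle counter with an
-- inner loop over the sample list itself, breaking once n queries are built; same values.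

def pvSamples : List String := [
  "python web scraping",
  "machine learning tutorial",
  "best programming languages 2024",
  "how to learn coding",
  "javascript frameworks",
  "data science projects",
  "cloud computing basics",
  "cybersecurity tips",
  "artificial intelligence news",
  "software engineering jobs",
  "react vs vue",
  "docker tutorial",
  "kubernetes basics",
  "git commands",
  "linux terminal commands",
  "sql database design",
  "mongodb tutorial",
  "api design best practices",
  "microservices architecture",
  "devops tools",
  "python fastapi",
  "web development trends",
  "mobile app development",
  "blockchain explained",
  "quantum computing basics",
  "rust programming language",
  "golang tutorial",
  "typescript vs javascript",
  "css flexbox guide",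
  "html5 features",
  "node.js best practices",
  "django vs flask",
  "aws services overview",
  "azure cloud platform",
  "google cloud tutorial",
  "redis caching",
  "elasticsearch basics",
  "graphql vs rest",
  "websocket tutorial",
  "oauth2 explained",
  "jwt authentication",
  "unit testing python",
  "integration testing",
  "ci cd pipeline",
  "agile methodology",
  "scrum framework",
  "product management",
  "ux design principles",
  "figma tutorial",
  "tech startup ideas"]

-- ===== PORT A =====
-- literal transliteration: for i in range(n): base = S[i % len(S)]; if i >= len(S): base += f" {i // len(S)}"
def generate_queries (n : Int) : List String :=
  (PySem.List.pyRange 0 n 1).foldl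
    (fun queries i =>
      let base := PySem.List.pyGetD pvSamples (PySem.Int.mod i (pvSamples.length : Int)) ""
      let base :=
        if (pvSamples.length : Int) ≤ i then
          base ++ " " ++ PySem.Int.toStr (PySem.Int.floordiv i (pvSamples.length : Int))
        else base
      queries ++ [base]) []

-- ===== PORT B =====
-- the variation applied in cycle c
def pvVary (c : Nat) (q : String) : String :=
  if c = 0 then q else q ++ " " ++ PySem.Int.toStr (c : Int)

-- inner for-loop over the sample list, breaking when `rem` items have been produced
def pvInner : List String → Nat → Nat → List String
  | [], _, _ => []
  | q :: qs, c, rem => if rem = 0 then [] else pvVary c q :: pvInner qs c (rem - 1)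

-- outer while-loop over cycle index c; `rem` queries still to produce
def pvOuter (c rem : Nat) : List String :=
  if rem = 0 then [] else pvInner pvSamples c rem ++ pvOuter (c + 1) (rem - pvSamples.length)
  termination_by rem
  decreasing_by
    have h : 0 < pvSamples.length := by decide
    omega

def generate_queries_alt (n : Int) : List String := pvOuter 0 n.toNat

-- ===== PRECONDITION & SPEC =====
def Spec_generate_queries (n : Int) (out : List String) : Prop := out = generate_queries_alt n
instance (n : Int) (out : List String) : Decidable (Spec_generate_queries n out) := by unfold Spec_generate_queries; infer_instance

-- ===== CLAIM (what is proved, stated in full; the proofs are below) =====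
def Claim_equal_generate_queries : Prop := ∀ (n : Int), Dom_generate_queries n → Spec_generate_queries n (generate_queries n)

-- ===== LEMMAS AND PROOFS =====

-- common normal form: query number k (0-based, globally) relative to cycle offset c
def pvG (c k : Nat) : String := pvVary (c + k / 50) (pvSamples.getD (k % 50) "")

theorem pvSamples_len : pvSamples.length = 50 := by decide

theorem pvInner_eq_take_map (xs : List String) (c rem : Nat) :
    pvInner xs c rem = (xs.take rem).map (pvVary c) := by
  induction xs generalizing rem with
  | nil => simp [pvInner]
  | cons q qs ih =>
    cases rem with
    | zero => simp [pvInner]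
    | succ m => simp [pvInner, ih]

theorem pvTake_map_eq_range (c m : Nat) (hm : m ≤ 50) :
    (pvSamples.take m).map (pvVary c) = (List.range m).map (pvG c) := by
  apply List.ext_getElem
  · simp [pvSamples_len]; omega
  · intro j h1 h2
    have hj : j < m := by simp [pvSamples_len] at h1; omega
    have hj50 : j < 50 := by omega
    have hjl : j < pvSamples.length := by rw [pvSamples_len]; omega
    simp [List.getElem_take, pvG, Nat.div_eq_of_lt hj50, Nat.mod_eq_of_lt hj50,
      List.getElem?_eq_getElem hjl]

theorem pvOuter_eq_range_map (c rem : Nat) :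
    pvOuter c rem = (List.range rem).map (pvG c) := by
  induction c, rem using pvOuter.induct with
  | case1 c => simp [pvOuter]
  | case2 c rem hrem ih =>
    rw [pvSamples_len] at ih
    rw [pvOuter, if_neg hrem, pvInner_eq_take_map, pvSamples_len, ih]
    by_cases hle : rem ≤ 50
    · have : rem - 50 = 0 := by omega
      rw [this, pvTake_map_eq_range c rem hle]
      simp
    · have hsplit : rem = 50 + (rem - 50) := by omega
      rw [hsplit, List.range_add, List.map_append, List.map_map]
      have h1 : pvSamples.take (50 + (rem - 50)) = pvSamples.take 50 := by
        rw [List.take_of_length_le (by rw [pvSamples_len]; omega),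
          List.take_of_length_le (by rw [pvSamples_len])]
      rw [h1, pvTake_map_eq_range c 50 (by omega)]
      congr 1
      simp only [Nat.add_sub_cancel_left]
      apply List.map_congr_left
      intro k _
      simp only [Function.comp_apply, pvG]
      have hd : (50 + k) / 50 = 1 + k / 50 := by omega
      have hm : (50 + k) % 50 = k % 50 := by omega
      rw [hd, hm, ← Nat.add_assoc]

theorem pvA_eq_range_map (n : Int) :
    generate_queries n = (List.range n.toNat).map (pvG 0) := by
  unfold generate_queries
  rw [PySem.List.foldl_append_singleton_eq_map, PySem.List.pyRange_one]
  simp only [sub_zero, List.map_map]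
  apply List.map_congr_left
  intro k _
  simp only [Function.comp_apply, zero_add, pvSamples_len, pvG, Nat.cast_ofNat]
  have hmod : PySem.Int.mod (k : Int) (50 : Int) = ((k % 50 : Nat) : Int) := by
    rw [PySem.Int.mod_eq_emod_of_pos (by omega)]; omega
  have hdiv : PySem.Int.floordiv (k : Int) (50 : Int) = ((k / 50 : Nat) : Int) := by
    rw [PySem.Int.floordiv_eq_ediv_of_pos (by omega)]; omega
  simp only [hmod, hdiv, PySem.List.pyGetD_natCast]
  by_cases hk : (50 : Int) ≤ (k : Int)
  · have hk' : 50 ≤ k := by exact_mod_cast hk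
    rw [if_pos hk, pvVary, if_neg (by omega)]
  · have hk' : k < 50 := by omega
    rw [if_neg hk, pvVary, if_pos (by omega)]

-- ===== VERDICT (by name: the statement is the Claim_ definition above) =====
theorem generate_queries_spec : Claim_equal_generate_queries := by
  intro n _
  unfold Spec_generate_queries generate_queries_alt
  rw [pvA_eq_range_map, pvOuter_eq_range_map]
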